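-- pv_equiv track=rewrite | github.com/rasha-hantash/technical-rag | backend/src/technical_rag/rag/llm_clients/embeddings.py | _get_batch_indices
-- ===== SOURCE A (Python) =====
-- def _get_batch_indices(
--     texts: list[str], batches: list[list[str]]
-- ) -> list[list[int]]:
--     """Get the original indices for each text in each batch.
--
--     Args:
--         texts: Original list of texts.
--         batches: List of batches.
--
--     Returns:
--         List of index lists, one per batch.
--     """
--     batch_indices = []
--     current_idx = 0
--
--     for batch in batches:
--         indices = list(range(current_idx, current_idx + len(batch)))
--         batch_indices.append(indices)
--         current_idx += len(batch)
--
--     return batch_indices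
-- ===== SOURCE B (Python) =====
-- def _get_batch_indices(
--     texts: list[str], batches: list[list[str]]
-- ) -> list[list[int]]:
--     """Prefix-sum boundary table, then pair consecutive offsets."""
--     offsets = [0]
--     for batch in batches:
--         offsets.append(offsets[-1] + len(batch))
--     return [list(range(start, end)) for start, end in zip(offsets, offsets[1:])]
-- ===== Notes on version B (the rewrite author's own statement) =====
-- stated objective: alternative
-- what changed: Replaces the single running-offset loop that appends ranges directly with a two-pass scheme: first build a prefix-sum offset boundary table, then map each pair of consecutive boundaries to its index range.
import Mathlib
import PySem

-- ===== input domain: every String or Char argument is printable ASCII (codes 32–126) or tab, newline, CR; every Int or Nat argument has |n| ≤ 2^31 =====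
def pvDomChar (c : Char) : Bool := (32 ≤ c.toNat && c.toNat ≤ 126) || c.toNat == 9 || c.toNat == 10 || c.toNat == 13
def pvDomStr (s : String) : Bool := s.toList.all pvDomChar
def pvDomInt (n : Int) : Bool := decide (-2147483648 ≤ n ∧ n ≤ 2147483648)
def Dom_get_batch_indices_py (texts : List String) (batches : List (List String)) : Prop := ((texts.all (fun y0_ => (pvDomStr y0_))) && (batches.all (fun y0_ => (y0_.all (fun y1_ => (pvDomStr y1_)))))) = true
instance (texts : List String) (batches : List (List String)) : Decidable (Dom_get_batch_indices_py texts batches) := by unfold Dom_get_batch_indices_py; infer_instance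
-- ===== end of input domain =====

-- B replaces A's running-offset loop with a prefix-sum boundary table plus a pass pairing
-- consecutive boundaries (objective: alternative decomposition, same cost).

-- ===== PORT A =====
-- literal port of A: one loop carrying (batch_indices, current_idx)
def get_batch_indices_py (texts : List String) (batches : List (List String)) : List (List Int) :=
  (batches.foldl
    (fun (st : List (List Int) × Int) batch =>
      (st.1 ++ [PySem.List.pyRange st.2 (st.2 + (batch.length : Int)) 1], st.2 + (batch.length : Int)))
    ([], 0)).1

-- ===== PORT B =====
-- literal port of Source B: build the offsets list (offsets[-1] read via getLastD 0; the list is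
-- always nonempty, so this is exact), then zip offsets with offsets[1:] (= tail, exact since
-- offsets is nonempty) and map each boundary pair to its range.
def get_batch_indices_py_alt (texts : List String) (batches : List (List String)) : List (List Int) :=
  let offsets := batches.foldl (fun os batch => os ++ [os.getLastD 0 + (batch.length : Int)]) [(0 : Int)]
  (offsets.zip offsets.tail).map (fun p => PySem.List.pyRange p.1 p.2 1)

-- ===== PRECONDITION & SPEC =====
def Spec_get_batch_indices_py (texts : List String) (batches : List (List String)) (out : List (List Int)) : Prop := out = get_batch_indices_py_alt texts batches
instance (texts : List String) (batches : List (List String)) (out : List (List Int)) : Decidable (Spec_get_batch_indices_py texts batches out) := by unfold Spec_get_batch_indices_py; infer_instance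

-- ===== CLAIM (what is proved, stated in full; the proofs are below) =====
def Claim_equal_get_batch_indices_py : Prop := ∀ (texts : List String) (batches : List (List String)), Dom_get_batch_indices_py texts batches → Spec_get_batch_indices_py texts batches (get_batch_indices_py texts batches)

-- ===== LEMMAS AND PROOFS =====

-- common recursive characterisation: ranges starting at s
def pvGo (s : Int) : List (List String) → List (List Int)
  | [] => []
  | b :: bs => PySem.List.pyRange s (s + (b.length : Int)) 1 :: pvGo (s + (b.length : Int)) bs

-- the offsets boundary list starting at s
def pvOfs (s : Int) : List (List String) → List Int
  | [] => [s]
  | b :: bs => s :: pvOfs (s + (b.length : Int)) bs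

lemma pvOfs_ne_nil (s : Int) (bs : List (List String)) : pvOfs s bs ≠ [] := by
  cases bs <;> simp [pvOfs]

lemma pvA_foldl (bs : List (List String)) :
    ∀ (acc : List (List Int)) (s : Int),
    (bs.foldl
      (fun (st : List (List Int) × Int) batch =>
        (st.1 ++ [PySem.List.pyRange st.2 (st.2 + (batch.length : Int)) 1], st.2 + (batch.length : Int)))
      (acc, s)).1 = acc ++ pvGo s bs := by
  induction bs with
  | nil => intro acc s; simp [pvGo]
  | cons b bs ih =>
    intro acc s
    simp only [List.foldl_cons, pvGo, ih]
    simp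

lemma pvOfs_head (s : Int) (bs : List (List String)) : (pvOfs s bs).head? = some s := by
  cases bs <;> simp [pvOfs]


lemma pvOfs_cons_head (s : Int) (bs : List (List String)) :
    s :: (pvOfs s bs).tail = pvOfs s bs := by
  cases bs <;> simp [pvOfs]

lemma pvB_offsets (bs : List (List String)) :
    ∀ (os : List Int) (s : Int), os ≠ [] → os.getLastD 0 = s →
    bs.foldl (fun os batch => os ++ [os.getLastD 0 + (batch.length : Int)]) os
      = os ++ (pvOfs s bs).tail := by
  induction bs with
  | nil => intro os s _ _; simp [pvOfs]
  | cons b bs ih =>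
    intro os s hne hl
    simp only [List.foldl_cons]
    rw [ih (os ++ [os.getLastD 0 + (b.length : Int)]) (s + (b.length : Int)) (by simp)
        (by rw [List.getLastD_eq_getLast?] at hl; simp [hl])]
    simp only [pvOfs, List.tail_cons, List.append_assoc, List.getLastD_eq_getLast?] at *
    rw [hl, List.singleton_append, pvOfs_cons_head]

lemma pvZip_pvOfs (s : Int) (bs : List (List String)) :
    ((pvOfs s bs).zip (pvOfs s bs).tail).map (fun p => PySem.List.pyRange p.1 p.2 1)
      = pvGo s bs := by
  induction bs generalizing s with
  | nil => simp [pvOfs, pvGo]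
  | cons b bs ih =>
    have h := pvOfs_head (s + (b.length : Int)) bs
    cases hos : pvOfs (s + (b.length : Int)) bs with
    | nil => exact absurd hos (pvOfs_ne_nil _ _)
    | cons x xs =>
      rw [hos] at h
      simp only [List.head?_cons, Option.some.injEq] at h
      subst h
      simp only [pvOfs, hos, List.tail_cons, List.zip_cons_cons, List.map_cons, pvGo]
      have hxs : xs = (pvOfs (s + (b.length : Int)) bs).tail := by rw [hos]; rfl
      rw [hxs, pvOfs_cons_head, ih]

-- ===== VERDICT (by name: the statement is the Claim_ definition above) =====
theorem get_batch_indices_py_spec : Claim_equal_get_batch_indices_py := by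
  intro texts batches _
  unfold Spec_get_batch_indices_py get_batch_indices_py get_batch_indices_py_alt
  rw [pvA_foldl, pvB_offsets batches [(0 : Int)] 0 (by simp) (by simp)]
  simp only [List.nil_append]
  rw [List.singleton_append, pvOfs_cons_head, pvZip_pvOfs]
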